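-- pv_equiv track=rewrite | github.com/pypi-data/pypi-mirror-401 | packages/tabpfn-common-utils/tabpfn_common_utils-0.2.14-py3-none-any.whl/tabpfn_common_utils/telemetry/core/decorators.py | _round_dims
-- ===== SOURCE A (Python) =====
-- def _round_dims(shape: tuple[int, int]) -> tuple[int, int]:
--     """Round the dimensionality of a dataset.
--
--     The intent is to anonymize the dataset dimensionality to prevent
--     leakage of sensitive information.
--
--     The function obscures the exact number of rows and columns in a dataset
--     by rounding them up to the nearest predefined thresholds. This helps
--     prevent leakage of sensitive information that might be inferred from
--     precise dataset dimensions.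
--
--     Args:
--         shape: The shape of the dataset.
--
--     Returns:
--         The rounded shape.
--     """
--     if not tuple(shape):
--         return 0, 0
--
--     # Limits for rounding the number of rows and columns
--     row_limits = [10, 50, 75, 100, 150, 200, 500, 1000]
--
--     # Limits for rounding the number of columns
--     col_limits = [5, 10, 15, 20, 25, 30, 40, 50, 75, 100]
--
--     def round_dim(n: int, limits: list[int]) -> int:
--         for limit in limits:
--             if n <= limit:
--                 return limit
--         return (n // 50) * 50
--
--     num_rows = round_dim(shape[0], row_limits)
--     num_columns = round_dim(shape[1], col_limits)
--     return num_rows, num_columns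
-- ===== SOURCE B (Python) =====
-- import bisect
--
-- _ROW_LIMITS = [10, 50, 75, 100, 150, 200, 500, 1000]
-- _COL_LIMITS = [5, 10, 15, 20, 25, 30, 40, 50, 75, 100]
--
--
-- def _round_up(n: int, limits: list[int]) -> int:
--     idx = bisect.bisect_left(limits, n)
--     if idx < len(limits):
--         return limits[idx]
--     return (n // 50) * 50
--
--
-- def _round_dims(shape: tuple[int, int]) -> tuple[int, int]:
--     if not tuple(shape):
--         return 0, 0
--     return _round_up(shape[0], _ROW_LIMITS), _round_up(shape[1], _COL_LIMITS)
-- ===== Notes on version B (the rewrite author's own statement) =====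
-- stated objective: idiomatic
-- what changed: Replaced the sequential threshold scan with bisect.bisect_left binary search on the sorted limit lists (module-level constants), falling back to (n // 50) * 50 only when the index equals the list length.
import Mathlib
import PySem

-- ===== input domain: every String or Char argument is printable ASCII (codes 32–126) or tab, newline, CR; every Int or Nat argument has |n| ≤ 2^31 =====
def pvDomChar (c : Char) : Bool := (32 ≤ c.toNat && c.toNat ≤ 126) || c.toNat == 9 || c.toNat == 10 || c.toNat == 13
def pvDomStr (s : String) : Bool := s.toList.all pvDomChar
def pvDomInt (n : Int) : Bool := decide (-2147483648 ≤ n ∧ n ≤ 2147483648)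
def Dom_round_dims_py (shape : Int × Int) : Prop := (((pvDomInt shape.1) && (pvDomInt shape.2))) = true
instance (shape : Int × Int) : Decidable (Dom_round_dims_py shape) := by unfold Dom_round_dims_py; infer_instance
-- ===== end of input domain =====

-- B replaces A's sequential threshold scan by bisect_left binary search over the sorted limit lists (idiomatic).

-- ===== PORT A =====
-- A's inner `round_dim`: linear scan, first limit with n <= limit, else (n // 50) * 50.
def pvRoundDimLoop (n : Int) : List Int → Int
  | [] => (PySem.Int.floordiv n 50) * 50
  | l :: ls => if n ≤ l then l else pvRoundDimLoop n ls

-- `if not tuple(shape)` is always False for a 2-tuple, so only the main path is reachable.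
def round_dims_py (shape : Int × Int) : Int × Int :=
  (pvRoundDimLoop shape.1 [10, 50, 75, 100, 150, 200, 500, 1000],
   pvRoundDimLoop shape.2 [5, 10, 15, 20, 25, 30, 40, 50, 75, 100])

-- ===== PORT B =====
-- bisect.bisect_left: binary search for the leftmost index with x <= xs[idx] (xs sorted).
def pvBisectLeft (xs : List Int) (x : Int) (lo hi : Nat) : Nat :=
  if _h : lo < hi then
    let mid := (lo + hi) / 2
    if xs.getD mid 0 < x then pvBisectLeft xs x (mid + 1) hi
    else pvBisectLeft xs x lo mid
  else lo
termination_by hi - lo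
decreasing_by all_goals omega

def pvRoundUp (n : Int) (limits : List Int) : Int :=
  let idx := pvBisectLeft limits n 0 limits.length
  if idx < limits.length then limits.getD idx 0
  else (PySem.Int.floordiv n 50) * 50

def round_dims_py_alt (shape : Int × Int) : Int × Int :=
  (pvRoundUp shape.1 [10, 50, 75, 100, 150, 200, 500, 1000],
   pvRoundUp shape.2 [5, 10, 15, 20, 25, 30, 40, 50, 75, 100])

-- ===== PRECONDITION & SPEC =====
def Spec_round_dims_py (shape : Int × Int) (out : Int × Int) : Prop := out = round_dims_py_alt shape
instance (shape : Int × Int) (out : Int × Int) : Decidable (Spec_round_dims_py shape out) := by unfold Spec_round_dims_py; infer_instance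

-- ===== CLAIM (what is proved, stated in full; the proofs are below) =====
def Claim_equal_round_dims_py : Prop := ∀ (shape : Int × Int), Dom_round_dims_py shape → Spec_round_dims_py shape (round_dims_py shape)

-- ===== LEMMAS AND PROOFS =====

-- Invariant of binary search: the result r brackets x (everything below r is < x,
-- and if r is in range then x ≤ xs[r]).
theorem pvBisectLeft_bracket (xs : List Int) (x : Int) :
    ∀ (fuel lo hi : Nat), hi - lo ≤ fuel → lo ≤ hi → hi ≤ xs.length →
    (∀ i j : Nat, i ≤ j → j < xs.length → xs.getD i 0 ≤ xs.getD j 0) →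
    (∀ i, i < lo → xs.getD i 0 < x) →
    (∀ i, hi ≤ i → i < xs.length → x ≤ xs.getD i 0) →
    pvBisectLeft xs x lo hi ≤ xs.length ∧
    (∀ i, i < pvBisectLeft xs x lo hi → xs.getD i 0 < x) ∧
    (pvBisectLeft xs x lo hi < xs.length → x ≤ xs.getD (pvBisectLeft xs x lo hi) 0) := by
  intro fuel
  induction fuel with
  | zero =>
    intro lo hi hf hlh hhl _hs hlow hhigh
    have : lo = hi := by omega
    subst this
    rw [pvBisectLeft]
    simp only [lt_irrefl, dite_false]
    exact ⟨hhl, hlow, fun h => hhigh lo le_rfl h⟩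
  | succ fuel ih =>
    intro lo hi hf hlh hhl hs hlow hhigh
    rw [pvBisectLeft]
    by_cases h : lo < hi
    · simp only [h, dite_true]
      by_cases hc : xs.getD ((lo + hi) / 2) 0 < x
      · simp only [hc, if_true]
        exact ih ((lo + hi) / 2 + 1) hi (by omega) (by omega) hhl hs
          (fun i hi' => lt_of_le_of_lt (hs i ((lo + hi) / 2) (by omega) (by omega)) hc)
          hhigh
      · simp only [hc, if_false]
        exact ih lo ((lo + hi) / 2) (by omega) (by omega) (by omega) hs hlow
          (fun i hi' hil => le_trans (not_lt.mp hc) (hs ((lo + hi) / 2) i hi' hil))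
    · simp only [h, dite_false]
      have : lo = hi := by omega
      subst this
      exact ⟨hhl, hlow, fun hlt => hhigh lo le_rfl hlt⟩

-- A's linear scan returns xs[r] for any bracketing index r (fallback when r = length).
theorem pvRoundDimLoop_of_bracket (n : Int) :
    ∀ (xs : List Int) (r : Nat), r ≤ xs.length →
    (∀ i, i < r → xs.getD i 0 < n) → (r < xs.length → n ≤ xs.getD r 0) →
    pvRoundDimLoop n xs =
      if r < xs.length then xs.getD r 0 else (PySem.Int.floordiv n 50) * 50 := by
  intro xs
  induction xs with
  | nil =>
    intro r hr _ _
    simp only [List.length_nil, Nat.le_zero] at hr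
    subst hr
    simp [pvRoundDimLoop]
  | cons l ls ihl =>
    intro r hr hlow hhigh
    cases r with
    | zero =>
      have hn : n ≤ l := by simpa using hhigh (by simp)
      simp [pvRoundDimLoop, hn]
    | succ r' =>
      have hl : l < n := by simpa using hlow 0 (Nat.succ_pos _)
      have hnl : ¬ n ≤ l := by omega
      have := ihl r' (by simpa using hr)
        (fun i hi => by simpa using hlow (i + 1) (by omega))
        (fun hlt => by simpa using hhigh (by simpa using hlt))
      simp only [pvRoundDimLoop, hnl, if_false, this, List.length_cons,
        Nat.succ_lt_succ_iff, List.getD_cons_succ]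

theorem pvRoundUp_eq (n : Int) (xs : List Int)
    (hs : ∀ i j : Nat, i ≤ j → j < xs.length → xs.getD i 0 ≤ xs.getD j 0) :
    pvRoundUp n xs = pvRoundDimLoop n xs := by
  obtain ⟨h1, h2, h3⟩ := pvBisectLeft_bracket xs n xs.length 0 xs.length
    (by omega) (Nat.zero_le _) le_rfl hs (by omega) (by omega)
  unfold pvRoundUp
  exact (pvRoundDimLoop_of_bracket n xs (pvBisectLeft xs n 0 xs.length) h1 h2 h3).symm

theorem rows_sorted : ∀ i j : Nat, i ≤ j → j < ([10, 50, 75, 100, 150, 200, 500, 1000] : List Int).length →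
    ([10, 50, 75, 100, 150, 200, 500, 1000] : List Int).getD i 0 ≤ ([10, 50, 75, 100, 150, 200, 500, 1000] : List Int).getD j 0 := by
  intro i j hij hj
  simp only [List.length] at hj
  interval_cases j <;> interval_cases i <;> decide

theorem cols_sorted : ∀ i j : Nat, i ≤ j → j < ([5, 10, 15, 20, 25, 30, 40, 50, 75, 100] : List Int).length →
    ([5, 10, 15, 20, 25, 30, 40, 50, 75, 100] : List Int).getD i 0 ≤ ([5, 10, 15, 20, 25, 30, 40, 50, 75, 100] : List Int).getD j 0 := by
  intro i j hij hj
  simp only [List.length] at hj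
  interval_cases j <;> interval_cases i <;> decide

-- ===== VERDICT (by name: the statement is the Claim_ definition above) =====
theorem round_dims_py_spec : Claim_equal_round_dims_py := by
  intro shape _
  unfold Spec_round_dims_py round_dims_py round_dims_py_alt
  rw [pvRoundUp_eq _ _ rows_sorted, pvRoundUp_eq _ _ cols_sorted]
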